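-- pv_equiv track=rewrite | github.com/FermatPredictor/simple_ai_chess_algorithm | Game_AI_agent/Reversi_Cython/eval_func_python.py | count_tile
-- ===== SOURCE A (Python) =====
-- def count_tile(board, height, width, tile):
--     score, opp = 0, tile^3
--     for r in range(height):
--         for c in range(width):
--             if board[r][c]==tile:
--                 score += 1
--             elif board[r][c]==opp:
--                 score -= 1
--     return score
-- ===== SOURCE B (Python) =====
-- def count_tile(board, height, width, tile):
--     cells = [board[r][c] for r in range(height) for c in range(width)]
--     counts = {}
--     for v in cells:
--         counts[v] = counts.get(v, 0) + 1
--     return counts.get(tile, 0) - counts.get(tile ^ 3, 0)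
-- ===== Notes on version B (the rewrite author's own statement) =====
-- stated objective: alternative
-- what changed: B flattens the in-bounds cells once and builds a frequency table (a dict counter), then answers with two O(1) lookups counts[tile] - counts[tile^3], instead of A's per-cell branching accumulator.
import Mathlib
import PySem

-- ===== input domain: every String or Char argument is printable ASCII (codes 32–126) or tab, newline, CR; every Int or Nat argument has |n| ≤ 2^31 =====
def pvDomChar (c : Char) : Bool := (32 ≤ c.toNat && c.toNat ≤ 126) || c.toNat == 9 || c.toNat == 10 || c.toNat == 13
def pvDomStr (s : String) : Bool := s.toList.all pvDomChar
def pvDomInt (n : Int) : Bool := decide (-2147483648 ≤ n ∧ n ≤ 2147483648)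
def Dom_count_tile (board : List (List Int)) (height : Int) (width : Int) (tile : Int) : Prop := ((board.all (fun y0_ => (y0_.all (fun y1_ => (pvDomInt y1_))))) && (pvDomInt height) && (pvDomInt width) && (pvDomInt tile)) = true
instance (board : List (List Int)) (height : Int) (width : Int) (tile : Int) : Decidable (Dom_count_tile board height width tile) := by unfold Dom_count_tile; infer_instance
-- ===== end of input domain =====

-- B replaces A's per-cell branching accumulator by a frequency table over the flattened
-- in-bounds cells, finishing with two lookups (alternative decomposition, same cost).

-- ===== PORT A =====
def count_tile (board : List (List Int)) (height : Int) (width : Int) (tile : Int) : Int :=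
  let opp := PySem.Int.bxor tile 3
  (PySem.List.pyRange 0 height 1).foldl (fun score r =>
    (PySem.List.pyRange 0 width 1).foldl (fun score c =>
      if PySem.List.pyGetD (PySem.List.pyGetD board r []) c 0 == tile then score + 1
      else if PySem.List.pyGetD (PySem.List.pyGetD board r []) c 0 == opp then score - 1
      else score) score) 0

-- ===== PORT B =====
def count_tile_alt (board : List (List Int)) (height : Int) (width : Int) (tile : Int) : Int :=
  let cells := (PySem.List.pyRange 0 height 1).flatMap (fun r =>
    (PySem.List.pyRange 0 width 1).map (fun c =>
      PySem.List.pyGetD (PySem.List.pyGetD board r []) c 0))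
  let counts := cells.foldl (fun d v => d.insert v (d.getD v 0 + 1)) PySem.Dict.empty
  counts.getD tile 0 - counts.getD (PySem.Int.bxor tile 3) 0

-- ===== PRECONDITION & SPEC =====
-- Pre_ excludes exactly the inputs on which the Python raises IndexError: a row index
-- below height past the end of board, or a column index below width past the end of a row.
def Pre_count_tile (board : List (List Int)) (height : Int) (width : Int) (tile : Int) : Prop :=
  width ≤ 0 ∨ (height ≤ (board.length : Int) ∧ ∀ row ∈ board.take height.toNat, width ≤ (row.length : Int))
instance (board : List (List Int)) (height : Int) (width : Int) (tile : Int) : Decidable (Pre_count_tile board height width tile) := by unfold Pre_count_tile; infer_instance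

def pvWitness_count_tile : List (List Int) × Int × Int × Int := ([[1, 2], [2, 1]], 2, 2, 1)

def Spec_count_tile (board : List (List Int)) (height : Int) (width : Int) (tile : Int) (out : Int) : Prop := out = count_tile_alt board height width tile
instance (board : List (List Int)) (height : Int) (width : Int) (tile : Int) (out : Int) : Decidable (Spec_count_tile board height width tile out) := by unfold Spec_count_tile; infer_instance

-- ===== CLAIM (what is proved, stated in full; the proofs are below) =====
def Claim_equal_count_tile : Prop := ∀ (board : List (List Int)) (height : Int) (width : Int) (tile : Int), Dom_count_tile board height width tile → Pre_count_tile board height width tile → Spec_count_tile board height width tile (count_tile board height width tile)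

-- ===== LEMMAS AND PROOFS =====

-- xor with 3 flips the low bit, so tile ^ 3 ≠ tile
theorem nat_xor3_ne (n : Nat) : n ^^^ 3 ≠ n := by
  intro h
  have h0 : (n ^^^ 3).testBit 0 = n.testBit 0 := by rw [h]
  rw [Nat.testBit_xor] at h0
  simp at h0

theorem bxor3_ne (t : Int) : PySem.Int.bxor t 3 ≠ t := by
  unfold PySem.Int.bxor
  norm_num
  split_ifs with h1
  · intro h
    rw [show Int.toNat 3 = 3 from rfl] at h
    exact nat_xor3_ne t.toNat (by omega)
  · intro h
    rw [show Int.toNat 3 = 3 from rfl] at h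
    exact nat_xor3_ne ((-t).toNat - 1) (by omega)

theorem fold_count (tile opp : Int) (hne : tile ≠ opp) (l : List Int) (s : Int) :
    l.foldl (fun score v => if v == tile then score + 1 else if v == opp then score - 1 else score) s
      = s + (l.count tile : Int) - (l.count opp : Int) := by
  induction l generalizing s with
  | nil => simp
  | cons v t ih =>
    simp only [List.foldl_cons, List.count_cons, ih]
    by_cases hv : v = tile
    · subst hv
      have hvo : (v == opp) = false := by simp [hne]
      simp [hvo]
      omega
    · by_cases ho : v = opp
      · subst ho
        have hvt : (v == tile) = false := by simp [hv]
        simp [hvt]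
        omega
      · simp [hv, ho]

theorem count_tile_spec : Claim_equal_count_tile := by
  intro board height width tile _ _
  unfold Spec_count_tile count_tile count_tile_alt
  simp only
  rw [PySem.Dict.foldl_insert_getD_add_one_eq_counter, PySem.Dict.getD_counter,
      PySem.Dict.getD_counter]
  have hne : tile ≠ PySem.Int.bxor tile 3 := fun h => bxor3_ne tile h.symm
  have hfl : ∀ (rs : List Int) (s : Int),
      rs.foldl (fun score r =>
        (PySem.List.pyRange 0 width 1).foldl (fun score c =>
          if PySem.List.pyGetD (PySem.List.pyGetD board r []) c 0 == tile then score + 1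
          else if PySem.List.pyGetD (PySem.List.pyGetD board r []) c 0 == PySem.Int.bxor tile 3 then score - 1
          else score) score) s
      = (rs.flatMap (fun r => (PySem.List.pyRange 0 width 1).map (fun c =>
          PySem.List.pyGetD (PySem.List.pyGetD board r []) c 0))).foldl
          (fun score v => if v == tile then score + 1 else if v == PySem.Int.bxor tile 3 then score - 1 else score) s := by
    intro rs s
    induction rs generalizing s with
    | nil => simp
    | cons r t ih =>
      simp only [List.foldl_cons, List.flatMap_cons, List.foldl_append, ih, List.foldl_map]
  rw [hfl, fold_count tile (PySem.Int.bxor tile 3) hne]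
  ring
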